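-- pv_equiv track=rewrite | github.com/AdamZhouSE/pythonHomework | Code/CodeRecords/2190/60788/261682.py | f
-- ===== SOURCE A (Python) =====
-- def f(s,t):
--     m=[]
--     n=[0]*(len(s)+1)
--     for i in range(len(s)):
--         for j in range(i+1,len(s)+1):
--             if g(s[i:j],s)==t:
--                 if not s[i:j] in m:
--                     m.append(s[i:j])
--                     n[j-i]+=1
--
--     if max(n)==0:
--         return -1
--     else:
--         r=1
--         for i in range(1,len(s)+1):
--             if n[i]>0 and n[i]>=n[r]:
--                 r=i
--         return r
--
-- def g(t,s):
--     if len(t)>len(s):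
--         return 0
--     else:
--         m=0
--         for i in range(0,len(s)-len(t)+1):
--             if s[i:i+len(t)]==t:
--                 m+=1
--         return m
-- ===== SOURCE B (Python) =====
-- def f(s, t):
--     # One pass building an occurrence counter of all substrings, then a per-length
--     # tally of distinct substrings occurring exactly t times (no inner rescan).
--     cnt = {}
--     for i in range(len(s)):
--         for j in range(i + 1, len(s) + 1):
--             w = s[i:j]
--             cnt[w] = cnt.get(w, 0) + 1
--     n = [0] * (len(s) + 1)
--     for w, c in cnt.items():
--         if c == t:
--             n[len(w)] += 1
--     best = -1
--     bestlen = -1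
--     for L in range(1, len(s) + 1):
--         if n[L] > 0 and n[L] >= best:
--             best = n[L]
--             bestlen = L
--     return bestlen if best > 0 else -1
-- ===== Notes on version B (the rewrite author's own statement) =====
-- stated objective: faster
-- what changed: B builds one hash-map counter of all substring occurrences in a single nested pass and then tallies distinct substrings per length, replacing A's per-substring rescan of the whole string (helper g) and the linear 'in m' membership scan.
import Mathlib
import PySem

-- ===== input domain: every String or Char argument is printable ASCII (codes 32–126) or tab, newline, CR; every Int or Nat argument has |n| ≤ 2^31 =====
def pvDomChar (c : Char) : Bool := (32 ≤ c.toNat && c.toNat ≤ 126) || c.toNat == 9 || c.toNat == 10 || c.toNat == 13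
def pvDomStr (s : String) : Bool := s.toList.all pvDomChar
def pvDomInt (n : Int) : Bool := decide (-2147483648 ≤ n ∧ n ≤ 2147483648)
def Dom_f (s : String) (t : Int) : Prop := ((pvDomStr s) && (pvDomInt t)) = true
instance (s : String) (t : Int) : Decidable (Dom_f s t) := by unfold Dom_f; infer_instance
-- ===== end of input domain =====

-- B replaces A's per-substring rescans (helper g and the 'in m' scan) by one dict counter
-- of all substring occurrences built in a single nested pass, then a per-length tally — faster.

-- ===== PORT A =====
-- Python's s[i:j] for Nat bounds (slicing primitive shared by both ports)
def pySub (cs : List Char) (i j : Nat) : List Char :=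
  PySem.List.slice cs (some (i : Int)) (some (j : Int))

-- Python helper g(t, s)
def gA (t : List Char) (s : List Char) : Int :=
  if t.length > s.length then 0
  else (List.range (s.length - t.length + 1)).foldl
    (fun m i => if pySub s i (i + t.length) = t then m + 1 else m) 0

def f (s : String) (t : Int) : Int :=
  let cs := s.toList
  let N := cs.length
  -- Python's n[j-i] reads/writes are always in range here: getD/set are exact
  let mn := (List.range N).foldl (fun mn i =>
      (List.range' (i+1) (N - i)).foldl (fun (mn : List (List Char) × List Int) j =>
        if gA (pySub cs i j) cs = t then
          if pySub cs i j ∉ mn.1 then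
            (mn.1 ++ [pySub cs i j], mn.2.set (j - i) (mn.2.getD (j - i) 0 + 1))
          else mn
        else mn) mn)
    (([] : List (List Char)), List.replicate (N+1) (0 : Int))
  -- max(n): n is nonempty so max? is some; getD 0 is exact
  if (PySem.List.max? mn.2 (fun x => x)).getD 0 = 0 then -1
  else (((List.range' 1 N).foldl (fun r i =>
      if mn.2.getD i 0 > 0 ∧ mn.2.getD i 0 ≥ mn.2.getD r 0 then i else r) 1 : Nat) : Int)

-- ===== PORT B =====
def f_alt (s : String) (t : Int) : Int :=
  let cs := s.toList
  let N := cs.length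
  -- one nested pass: occurrence counter of every substring
  let cnt := (List.range N).foldl (fun d i =>
      (List.range' (i+1) (N - i)).foldl (fun (d : PySem.Dict (List Char) Int) j =>
        let w := pySub cs i j
        d.insert w (d.getD w 0 + 1)) d)
    PySem.Dict.empty
  -- per-length tally of distinct substrings occurring exactly t times
  let n := cnt.items.foldl (fun n (wc : List Char × Int) =>
      if wc.2 = t then n.set wc.1.length (n.getD wc.1.length 0 + 1) else n)
    (List.replicate (N+1) (0 : Int))
  -- single scan for the best (count, length), larger length wins ties
  let bb := (List.range' 1 N).foldl (fun (bb : Int × Int) L =>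
      if n.getD L 0 > 0 ∧ n.getD L 0 ≥ bb.1 then (n.getD L 0, (L : Int)) else bb)
    ((-1 : Int), (-1 : Int))
  if bb.1 > 0 then bb.2 else -1

-- ===== PRECONDITION & SPEC =====
def Spec_f (s : String) (t : Int) (out : Int) : Prop := out = f_alt s t
instance (s : String) (t : Int) (out : Int) : Decidable (Spec_f s t out) := by unfold Spec_f; infer_instance

-- ===== CLAIM (what is proved, stated in full; the proofs are below) =====
def Claim_equal_f : Prop := ∀ (s : String) (t : Int), Dom_f s t → Spec_f s t (f s t)

-- ===== LEMMAS AND PROOFS =====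

-- the stream of all (nonempty) substrings in the two programs' common iteration order
def wsub (cs : List Char) : List (List Char) :=
  (List.range cs.length).flatMap (fun i =>
    (List.range' (i+1) (cs.length - i)).map (fun j => pySub cs i j))

-- A's inner-loop body, as a function of the substring alone
def stepA (cs : List Char) (t : Int) (mn : List (List Char) × List Int) (w : List Char) :
    List (List Char) × List Int :=
  if gA w cs = t then
    if w ∉ mn.1 then (mn.1 ++ [w], mn.2.set w.length (mn.2.getD w.length 0 + 1)) else mn
  else mn

lemma pySub_length (cs : List Char) (i j : Nat) (_hij : i ≤ j) (hj : j ≤ cs.length) :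
    (pySub cs i j).length = j - i := by
  simp [pySub, PySem.List.slice_natCast]
  omega

lemma mem_wsub {cs : List Char} {w : List Char} (hw : w ∈ wsub cs) :
    1 ≤ w.length ∧ w.length ≤ cs.length := by
  simp only [wsub, List.mem_flatMap, List.mem_map, List.mem_range, List.mem_range'_1] at hw
  obtain ⟨i, hi, j, hj, rfl⟩ := hw
  rw [pySub_length cs i j (by omega) (by omega)]
  omega

lemma getD_set_bump (n : List Int) (idx L : Nat) (hidx : idx < n.length) :
    (n.set idx (n.getD idx 0 + 1)).getD L 0 =
      if idx = L then n.getD L 0 + 1 else n.getD L 0 := by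
  simp only [List.getD_eq_getElem?_getD, List.getElem?_set, hidx, if_true]
  split_ifs with h
  · subst h; simp
  · rfl

lemma countP_unique (l : List Nat) (p : Nat → Bool) (j0 : Nat) (hnd : l.Nodup)
    (hu : ∀ x ∈ l, p x = true → x = j0) :
    l.countP p = if j0 ∈ l ∧ p j0 then 1 else 0 := by
  induction l with
  | nil => simp
  | cons x xs ih =>
    rw [List.countP_cons]
    rcases List.nodup_cons.mp hnd with ⟨hx, hnd'⟩
    have ih' := ih hnd' (fun y hy hp => hu y (List.mem_cons_of_mem x hy) hp)
    by_cases hpx : p x = true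
    · have hxj : x = j0 := hu x List.mem_cons_self hpx
      subst hxj
      have : List.countP p xs = 0 := by
        rw [List.countP_eq_zero]
        intro y hy hpy
        exact hx (hu y (List.mem_cons_of_mem x hy) hpy ▸ hy)
      simp [this, hpx]
    · simp only [hpx]
      rw [ih']
      by_cases hj : j0 = x
      · subst hj; simp [hpx]
      · simp [List.mem_cons, hj]

-- A's nested loops are the fold of stepA over the substring stream
lemma phaseA_eq (cs : List Char) (t : Int) :
    ((List.range cs.length).foldl (fun mn i =>
      (List.range' (i+1) (cs.length - i)).foldl (fun (mn : List (List Char) × List Int) j =>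
        if gA (pySub cs i j) cs = t then
          if pySub cs i j ∉ mn.1 then
            (mn.1 ++ [pySub cs i j], mn.2.set (j - i) (mn.2.getD (j - i) 0 + 1))
          else mn
        else mn) mn)
      (([] : List (List Char)), List.replicate (cs.length+1) (0 : Int)))
    = (wsub cs).foldl (stepA cs t) (([] : List (List Char)), List.replicate (cs.length+1) (0 : Int)) := by
  rw [wsub, List.foldl_flatMap]
  apply PySem.List.foldl_congr_mem'
  intro i hi acc
  rw [List.foldl_map]
  apply PySem.List.foldl_congr_mem'
  intro j hj mn
  rw [List.mem_range] at hi
  rw [List.mem_range'_1] at hj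
  rw [stepA]
  have hlen : (pySub cs i j).length = j - i := pySub_length cs i j (by omega) (by omega)
  rw [hlen]

-- B's nested loops build exactly Counter(wsub cs)
lemma phaseB_eq' (cs : List Char) :
    ((List.range cs.length).foldl (fun d i =>
      (List.range' (i+1) (cs.length - i)).foldl (fun (d : PySem.Dict (List Char) Int) j =>
        d.insert (pySub cs i j) ((d.getD (pySub cs i j) 0) + 1)) d)
      PySem.Dict.empty)
    = PySem.Dict.counter (wsub cs) := by
  rw [← PySem.Dict.foldl_insert_getD_add_one_eq_counter, wsub, List.foldl_flatMap]
  apply PySem.List.foldl_congr_mem'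
  intro i _ acc
  rw [List.foldl_map]

-- characterisation of A's first phase
lemma phaseA_char (cs : List Char) (t : Int) (P : List (List Char))
    (hP : ∀ w ∈ P, 1 ≤ w.length ∧ w.length ≤ cs.length) :
    let mn := P.foldl (stepA cs t) (([] : List (List Char)), List.replicate (cs.length+1) (0 : Int))
    mn.1.Nodup ∧ (∀ w, w ∈ mn.1 ↔ w ∈ P ∧ gA w cs = t) ∧ mn.2.length = cs.length + 1 ∧
      (∀ L : Nat, mn.2.getD L 0 = (mn.1.countP (fun w => w.length == L) : Int)) := by
  induction P using List.reverseRecOn with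
  | nil =>
    refine ⟨List.nodup_nil, by simp, by simp, ?_⟩
    intro L
    simp [List.getD_eq_getElem?_getD, List.getElem?_replicate]
    split_ifs <;> simp
  | append_singleton P w ih =>
    have hP' : ∀ x ∈ P, 1 ≤ x.length ∧ x.length ≤ cs.length := by
      intro x hx; exact hP x (List.mem_append_left _ hx)
    have hw : 1 ≤ w.length ∧ w.length ≤ cs.length := hP w (by simp)
    obtain ⟨hnd, hmem, hlen, hgd⟩ := ih hP'
    rw [List.foldl_append, List.foldl_cons, List.foldl_nil]
    set mn := P.foldl (stepA cs t) (([] : List (List Char)), List.replicate (cs.length+1) (0 : Int)) with hmn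
    rw [stepA]
    by_cases hg : gA w cs = t
    · by_cases hin : w ∈ mn.1
      · rw [if_pos hg, if_neg (not_not_intro hin)]
        refine ⟨hnd, ?_, hlen, hgd⟩
        intro w'
        rw [hmem w', List.mem_append, List.mem_singleton]
        constructor
        · rintro ⟨h1, h2⟩; exact ⟨Or.inl h1, h2⟩
        · rintro ⟨h1 | h1, h2⟩
          · exact ⟨h1, h2⟩
          · exact ⟨h1 ▸ ((hmem w).mp hin).1, h2⟩
      · rw [if_pos hg, if_pos hin]
        refine ⟨?_, ?_, by simpa using hlen, ?_⟩
        · exact List.Nodup.append hnd (List.nodup_singleton w) (by simpa using hin)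
        · intro w'
          rw [List.mem_append, List.mem_singleton, List.mem_append, List.mem_singleton, hmem w']
          constructor
          · rintro (⟨h1, h2⟩ | h1)
            · exact ⟨Or.inl h1, h2⟩
            · exact ⟨Or.inr h1, h1 ▸ hg⟩
          · rintro ⟨h1 | h1, h2⟩
            · exact Or.inl ⟨h1, h2⟩
            · exact Or.inr h1
        · intro L
          rw [getD_set_bump mn.2 w.length L (by omega)]
          rw [List.countP_append, List.countP_singleton]
          by_cases hL : w.length = L
          · rw [if_pos hL, hgd L]
            have hb : (w.length == L) = true := by simp [hL]
            rw [hb]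
            simp only [if_true]
            push_cast; omega
          · rw [if_neg hL, hgd L]
            have hb : (w.length == L) = false := by simp [hL]
            rw [hb]
            simp
    · rw [if_neg hg]
      refine ⟨hnd, ?_, hlen, hgd⟩
      intro w'
      rw [hmem w', List.mem_append, List.mem_singleton]
      constructor
      · rintro ⟨h1, h2⟩; exact ⟨Or.inl h1, h2⟩
      · rintro ⟨h1 | h1, h2⟩
        · exact ⟨h1, h2⟩
        · exact absurd (h1 ▸ h2) hg

-- characterisation of B's second phase
lemma phaseB2_char (cs : List Char) (t : Int) (items : List (List Char × Int))
    (hI : ∀ p ∈ items, p.1.length ≤ cs.length) :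
    let n := items.foldl (fun n (wc : List Char × Int) =>
      if wc.2 = t then n.set wc.1.length (n.getD wc.1.length 0 + 1) else n)
      (List.replicate (cs.length+1) (0 : Int))
    n.length = cs.length + 1 ∧
      (∀ L : Nat, n.getD L 0 = (items.countP (fun wc => wc.2 == t && wc.1.length == L) : Int)) := by
  induction items using List.reverseRecOn with
  | nil =>
    refine ⟨by simp, ?_⟩
    intro L
    simp [List.getD_eq_getElem?_getD, List.getElem?_replicate]
    split_ifs <;> simp
  | append_singleton items wc ih =>
    have hI' : ∀ p ∈ items, p.1.length ≤ cs.length := by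
      intro p hp; exact hI p (List.mem_append_left _ hp)
    have hwc : wc.1.length ≤ cs.length := hI wc (by simp)
    obtain ⟨hlen, hgd⟩ := ih hI'
    rw [List.foldl_append, List.foldl_cons, List.foldl_nil]
    set n := items.foldl (fun n (wc : List Char × Int) =>
      if wc.2 = t then n.set wc.1.length (n.getD wc.1.length 0 + 1) else n)
      (List.replicate (cs.length+1) (0 : Int)) with hn
    by_cases ht : wc.2 = t
    · rw [if_pos ht]
      refine ⟨by simpa using hlen, ?_⟩
      intro L
      rw [getD_set_bump n wc.1.length L (by omega)]
      rw [List.countP_append, List.countP_singleton]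
      have hb : (wc.2 == t) = true := by simp [ht]
      by_cases hL : wc.1.length = L
      · have hb2 : (wc.1.length == L) = true := by simp [hL]
        rw [if_pos hL, hgd L, hb, hb2]
        simp only [Bool.and_self, if_true]
        push_cast; omega
      · have hb2 : (wc.1.length == L) = false := by simp [hL]
        rw [if_neg hL, hgd L, hb2]
        simp
    · rw [if_neg ht]
      refine ⟨hlen, ?_⟩
      intro L
      rw [List.countP_append, List.countP_singleton]
      have hb : (wc.2 == t) = false := by simp [ht]
      rw [hb, hgd L]
      simp

lemma inner_count (cs : List Char) (w : List Char) (i : Nat) (hi : i < cs.length)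
    (hw : 1 ≤ w.length) :
    ((List.range' (i+1) (cs.length - i)).map (fun j => pySub cs i j)).count w
      = if i + w.length ≤ cs.length ∧ pySub cs i (i + w.length) = w then 1 else 0 := by
  rw [List.count_eq_countP, List.countP_map]
  have huniq : ∀ j ∈ List.range' (i+1) (cs.length - i),
      ((fun x => x == w) ∘ (fun j => pySub cs i j)) j = true → j = i + w.length := by
    intro j hj hpj
    rw [List.mem_range'_1] at hj
    simp only [Function.comp, beq_iff_eq] at hpj
    have := pySub_length cs i j (by omega) (by omega)
    rw [hpj] at this
    omega
  rw [countP_unique _ _ (i + w.length) (List.nodup_range') huniq]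
  simp only [Function.comp, beq_iff_eq, List.mem_range'_1]
  by_cases hle : i + w.length ≤ cs.length
  · by_cases hm : pySub cs i (i + w.length) = w
    · rw [if_pos ⟨⟨by omega, by omega⟩, by simp [hm]⟩, if_pos ⟨hle, hm⟩]
    · rw [if_neg, if_neg (by tauto)]
      rintro ⟨-, hd⟩
      exact hm (by simpa using hd)
  · rw [if_neg (by omega), if_neg (by tauto)]

-- occurrence count in the substring stream = A's helper g
lemma count_wsub (cs : List Char) (w : List Char) (hw : w ∈ wsub cs) :
    ((wsub cs).count w : Int) = gA w cs := by
  obtain ⟨hw1, hw2⟩ := mem_wsub hw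
  rw [wsub, List.count_flatMap]
  have hmap : (List.range cs.length).map
      (List.count w ∘ fun i => (List.range' (i+1) (cs.length - i)).map (fun j => pySub cs i j))
      = (List.range cs.length).map
        (fun i => if i + w.length ≤ cs.length ∧ pySub cs i (i + w.length) = w then 1 else 0) := by
    apply List.map_congr_left
    intro i hi
    rw [List.mem_range] at hi
    exact inner_count cs w i hi hw1
  rw [hmap]
  -- sum of 0/1 is countP
  have hsum : ∀ (l : List Nat),
      (l.map (fun i => if i + w.length ≤ cs.length ∧ pySub cs i (i + w.length) = w then 1 else 0)).sum
      = l.countP (fun i => decide (i + w.length ≤ cs.length ∧ pySub cs i (i + w.length) = w)) := by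
    intro l
    induction l with
    | nil => simp
    | cons x xs ih =>
      rw [List.map_cons, List.sum_cons, List.countP_cons, ih]
      by_cases h : x + w.length ≤ cs.length ∧ pySub cs x (x + w.length) = w
      · simp only [if_pos h, decide_eq_true h, if_true]; omega
      · simp [h]
  rw [hsum]
  -- restrict the range
  have hsplit : cs.length = (cs.length - w.length + 1) + (w.length - 1) := by omega
  rw [show List.range cs.length = List.range ((cs.length - w.length + 1) + (w.length - 1)) from by rw [← hsplit],
    List.range_add, List.countP_append]
  have h1 : (List.range (cs.length - w.length + 1)).countP
      (fun i => decide (i + w.length ≤ cs.length ∧ pySub cs i (i + w.length) = w))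
      = (List.range (cs.length - w.length + 1)).countP (fun i => decide (pySub cs i (i + w.length) = w)) := by
    apply List.countP_congr
    intro i hi
    rw [List.mem_range] at hi
    simp only [decide_eq_true_eq]
    constructor
    · rintro ⟨-, h⟩; exact h
    · intro h; exact ⟨by omega, h⟩
  have h2 : (((List.range (w.length - 1)).map (fun x => cs.length - w.length + 1 + x)).countP
      (fun i => decide (i + w.length ≤ cs.length ∧ pySub cs i (i + w.length) = w))) = 0 := by
    rw [List.countP_eq_zero]
    intro i hi
    rw [List.mem_map] at hi
    obtain ⟨x, -, rfl⟩ := hi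
    simp only [decide_eq_true_eq]
    rintro ⟨h, -⟩
    omega
  rw [h1, h2]
  rw [gA, if_neg (by omega)]
  rw [PySem.List.foldl_ite_add_one (fun i => pySub cs i (i + w.length) = w)]
  simp

-- the per-length tallies of the two programs agree
lemma tallies_eq (cs : List Char) (t : Int) :
    ∀ L : Nat,
      ((wsub cs).foldl (stepA cs t)
        (([] : List (List Char)), List.replicate (cs.length+1) (0 : Int))).2.getD L 0 =
      ((PySem.Dict.counter (wsub cs)).items.foldl (fun n (wc : List Char × Int) =>
        if wc.2 = t then n.set wc.1.length (n.getD wc.1.length 0 + 1) else n)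
        (List.replicate (cs.length+1) (0 : Int))).getD L 0 := by
  have hws : ∀ w ∈ wsub cs, 1 ≤ w.length ∧ w.length ≤ cs.length := fun w hw => mem_wsub hw
  obtain ⟨hnd, hmem, hlen, hgd⟩ := phaseA_char cs t (wsub cs) hws
  rw [PySem.Dict.items_counter]
  set items := (PySem.Set.ofList (wsub cs)).map
    (fun k => (k, (List.count k (wsub cs) : Int))) with hitems
  have hI : ∀ p ∈ items, p.1.length ≤ cs.length := by
    intro p hp
    rw [hitems, List.mem_map] at hp
    obtain ⟨k, hk, rfl⟩ := hp
    exact (hws k ((PySem.Set.mem_ofList _ _).mp hk)).2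
  obtain ⟨hlenB, hgdB⟩ := phaseB2_char cs t items hI
  intro L
  rw [hgd L, hgdB L]
  rw [hitems, List.countP_map]
  have hcong : (PySem.Set.ofList (wsub cs)).countP
      ((fun wc : List Char × Int => wc.2 == t && wc.1.length == L) ∘
        (fun k => (k, (List.count k (wsub cs) : Int))))
      = (PySem.Set.ofList (wsub cs)).countP (fun k => gA k cs == t && k.length == L) := by
    apply List.countP_congr
    intro k hk
    have hkws : k ∈ wsub cs := (PySem.Set.mem_ofList _ _).mp hk
    simp only [Function.comp, Bool.and_eq_true, beq_iff_eq]
    rw [count_wsub cs k hkws]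
  rw [hcong]
  have hperm : ((wsub cs).foldl (stepA cs t)
      (([] : List (List Char)), List.replicate (cs.length+1) (0 : Int))).1.filter
        (fun w => w.length == L)
      |>.Perm ((PySem.Set.ofList (wsub cs)).filter (fun k => gA k cs == t && k.length == L)) := by
    rw [List.perm_ext_iff_of_nodup (hnd.filter _) ((PySem.Set.nodup_ofList (wsub cs)).filter _)]
    intro x
    simp only [List.mem_filter, Bool.and_eq_true, beq_iff_eq, hmem x, PySem.Set.mem_ofList _ x]
    tauto
  rw [List.countP_eq_length_filter, List.countP_eq_length_filter, hperm.length_eq]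

-- final-scan equivalence once a positive best is held
lemma sel2 (nA : List Int) :
    ∀ (ls : List Nat) (r : Nat) (bb : Int × Int),
      bb.2 = (r : Int) → bb.1 = nA.getD r 0 → 0 < bb.1 →
      (let r' := ls.foldl (fun r i =>
        if nA.getD i 0 > 0 ∧ nA.getD i 0 ≥ nA.getD r 0 then i else r) r
      let bb' := ls.foldl (fun (bb : Int × Int) L =>
        if nA.getD L 0 > 0 ∧ nA.getD L 0 ≥ bb.1 then (nA.getD L 0, (L : Int)) else bb) bb
      bb'.2 = (r' : Int) ∧ bb'.1 = nA.getD r' 0 ∧ 0 < bb'.1) := by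
  intro ls
  induction ls with
  | nil => intro r bb h1 h2 h3; exact ⟨h1, h2, h3⟩
  | cons L ls ih =>
    intro r bb h1 h2 h3
    simp only [List.foldl_cons]
    by_cases hc : nA.getD L 0 > 0 ∧ nA.getD L 0 ≥ nA.getD r 0
    · rw [if_pos hc, if_pos (by rw [h2]; exact hc)]
      exact ih L (nA.getD L 0, (L : Int)) rfl rfl hc.1
    · rw [if_neg hc, if_neg (by rw [h2]; exact hc)]
      exact ih r bb h1 h2 h3

-- final-scan equivalence from the initial states
lemma sel1 (nA : List Int) :
    ∀ (ls : List Nat),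
      (nA.getD 1 0 ≤ 0 ∨ ls.head? = some 1) →
      (let r' := ls.foldl (fun r i =>
        if nA.getD i 0 > 0 ∧ nA.getD i 0 ≥ nA.getD r 0 then i else r) 1
      let bb' := ls.foldl (fun (bb : Int × Int) L =>
        if nA.getD L 0 > 0 ∧ nA.getD L 0 ≥ bb.1 then (nA.getD L 0, (L : Int)) else bb) ((-1 : Int), (-1 : Int))
      (bb'.2 = (r' : Int) ∧ bb'.1 = nA.getD r' 0 ∧ 0 < bb'.1) ∨
      (r' = 1 ∧ bb' = ((-1 : Int), (-1 : Int)) ∧ ∀ L ∈ ls, nA.getD L 0 ≤ 0)) := by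
  intro ls
  induction ls with
  | nil => intro _; right; exact ⟨rfl, rfl, by simp⟩
  | cons L ls ih =>
    intro hh
    simp only [List.foldl_cons]
    by_cases hpos : 0 < nA.getD L 0
    · -- both conditions fire: A needs nA L ≥ nA 1, B needs nA L ≥ -1
      have hA : nA.getD L 0 > 0 ∧ nA.getD L 0 ≥ nA.getD 1 0 := by
        rcases hh with h | h
        · exact ⟨hpos, by omega⟩
        · simp only [List.head?_cons, Option.some.injEq] at h
          subst h
          exact ⟨hpos, le_refl _⟩
      rw [if_pos hA, if_pos (by constructor; exact hpos; omega)]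
      left
      exact sel2 nA ls L (nA.getD L 0, (L : Int)) rfl rfl hpos
    · have hA : ¬ (nA.getD L 0 > 0 ∧ nA.getD L 0 ≥ nA.getD 1 0) := by tauto
      have hB : ¬ (nA.getD L 0 > 0 ∧ nA.getD L 0 ≥ (-1 : Int)) := by tauto
      rw [if_neg hA, if_neg hB]
      have h1le : nA.getD 1 0 ≤ 0 := by
        rcases hh with h | h
        · exact h
        · simp only [List.head?_cons, Option.some.injEq] at h
          subst h
          omega
      rcases ih (Or.inl h1le) with h | ⟨hr, hbb, hall⟩
      · left; exact h
      · right
        refine ⟨hr, hbb, ?_⟩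
        intro L' hL'
        rcases List.mem_cons.mp hL' with rfl | hL'
        · omega
        · exact hall L' hL'

lemma main_eq (s : String) (t : Int) : f s t = f_alt s t := by
  simp only [f, f_alt]
  rw [phaseA_eq s.toList t, phaseB_eq' s.toList]
  set cs := s.toList with hcs
  set mn := (wsub cs).foldl (stepA cs t)
    (([] : List (List Char)), List.replicate (cs.length+1) (0 : Int)) with hmn
  set nB := (PySem.Dict.counter (wsub cs)).items.foldl (fun n (wc : List Char × Int) =>
      if wc.2 = t then n.set wc.1.length (n.getD wc.1.length 0 + 1) else n)
    (List.replicate (cs.length+1) (0 : Int)) with hnB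
  have htal : ∀ L : Nat, mn.2.getD L 0 = nB.getD L 0 := tallies_eq cs t
  simp only [← htal]
  obtain ⟨hnd, hmem, hlen, hgd⟩ := phaseA_char cs t (wsub cs) (fun w hw => mem_wsub hw)
  rw [← hmn] at hnd hmem hlen hgd
  have hnn : ∀ L : Nat, 0 ≤ mn.2.getD L 0 := by
    intro L; rw [hgd L]; exact Int.natCast_nonneg _
  have h0 : mn.2.getD 0 0 = 0 := by
    rw [hgd 0]
    have : mn.1.countP (fun w => w.length == 0) = 0 := by
      rw [List.countP_eq_zero]
      intro w hw
      have := (mem_wsub ((hmem w).mp hw).1).1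
      intro hc
      simp only [beq_iff_eq] at hc
      omega
    rw [this]; rfl
  by_cases hmax : (PySem.List.max? mn.2 (fun x => x)).getD 0 = 0
  · rw [if_pos hmax]
    -- all entries are zero; neither loop ever fires
    have hne : mn.2 ≠ [] := by
      intro h; rw [h] at hlen; simp at hlen
    obtain ⟨m, hm⟩ : ∃ m, PySem.List.max? mn.2 (fun x => x) = some m := by
      cases h : PySem.List.max? mn.2 (fun x => x) with
      | none => exact absurd ((PySem.List.max?_eq_none_iff _ _).mp h) hne
      | some m => exact ⟨m, rfl⟩
    have hm0 : m = 0 := by rw [hm] at hmax; simpa using hmax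
    have hall : ∀ L : Nat, mn.2.getD L 0 = 0 := by
      intro L
      by_cases hL : L < mn.2.length
      · rw [List.getD_eq_getElem _ 0 hL]
        have h1 := PySem.List.max?_isMax hm (mn.2[L]) (List.getElem_mem hL)
        have h2 := hnn L
        rw [List.getD_eq_getElem _ 0 hL] at h2
        omega
      · exact List.getD_eq_default _ 0 (by omega)
    have h1le : mn.2.getD 1 0 ≤ 0 := by rw [hall 1]
    rcases sel1 mn.2 (List.range' 1 cs.length) (Or.inl h1le) with h | ⟨-, hbb, -⟩
    · rw [hall] at h; omega
    · rw [hbb]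
      norm_num
  · rw [if_neg hmax]
    obtain ⟨m, hm⟩ : ∃ m, PySem.List.max? mn.2 (fun x => x) = some m := by
      cases h : PySem.List.max? mn.2 (fun x => x) with
      | none =>
        exact absurd ((PySem.List.max?_eq_none_iff _ _).mp h)
          (by intro hh; rw [hh] at hlen; simp at hlen)
      | some m => exact ⟨m, rfl⟩
    have hm0 : m ≠ 0 := by rw [hm] at hmax; simpa using hmax
    obtain ⟨idx, hidx, hval⟩ := List.mem_iff_getElem.mp (PySem.List.max?_mem hm)
    have hpos : 0 < mn.2.getD idx 0 := by
      rw [List.getD_eq_getElem _ 0 hidx, hval]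
      have := hnn idx
      rw [List.getD_eq_getElem _ 0 hidx, hval] at this
      omega
    have hidx0 : idx ≠ 0 := by
      intro h; rw [h, h0] at hpos; omega
    have hidxle : idx ≤ cs.length := by rw [hlen] at hidx; omega
    have hcs1 : 1 ≤ cs.length := by omega
    have hhead : (List.range' 1 cs.length).head? = some 1 := by
      cases hh : cs.length with
      | zero => omega
      | succ k => rw [List.range'_succ]; simp
    rcases sel1 mn.2 (List.range' 1 cs.length) (Or.inr hhead) with ⟨hb2, hb1, hbp⟩ | ⟨-, -, hall⟩
    · rw [if_pos hbp, hb2]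
    · exact absurd (hall idx (by rw [List.mem_range'_1]; omega)) (by omega)

-- ===== VERDICT (by name: the statement is the Claim_ definition above) =====
theorem f_spec : Claim_equal_f := by
  intro s t _
  unfold Spec_f
  exact main_eq s t
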